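-- pv_equiv track=rewrite | github.com/harrystylesa/BiLSTM-CRF-sequence-label-model | data_preprocessor/preprocessor_pretrained.py | get_cws_labels_of_sentence
-- ===== SOURCE A (Python) =====
-- def get_cws_labels_of_sentence(s):
--     '''
--     return a list of sentence's labels
--     :param s: str
--     :return: list(str)
--     '''
--     label = []
--     for word in s.split():
--         if len(word) == 1:
--             label.extend(['s'])
--         elif len(word) > 1:
--             for i in range(len(word)):
--                 if i == 0:
--                     label.extend(['b'])
--                 elif i == len(word) - 1:
--                     label.extend(['e'])
--                 else:
--                     label.extend(['m'])
--     return label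
-- ===== SOURCE B (Python) =====
-- def get_cws_labels_of_sentence(s):
--     '''
--     return a list of sentence's labels
--     :param s: str
--     :return: list(str)
--     '''
--     return [lab for word in s.split()
--             for lab in (['s'] if len(word) == 1 else
--                         ['b'] + ['m'] * (len(word) - 2) + ['e'])]
-- ===== Notes on version B (the rewrite author's own statement) =====
-- stated objective: simpler
-- what changed: Replaces the per-character index loop with its i==0 / i==len-1 branch chain by a per-word closed-form block ['b'] + ['m']*(len-2) + ['e'] built inside a single flat comprehension.
import Mathlib
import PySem

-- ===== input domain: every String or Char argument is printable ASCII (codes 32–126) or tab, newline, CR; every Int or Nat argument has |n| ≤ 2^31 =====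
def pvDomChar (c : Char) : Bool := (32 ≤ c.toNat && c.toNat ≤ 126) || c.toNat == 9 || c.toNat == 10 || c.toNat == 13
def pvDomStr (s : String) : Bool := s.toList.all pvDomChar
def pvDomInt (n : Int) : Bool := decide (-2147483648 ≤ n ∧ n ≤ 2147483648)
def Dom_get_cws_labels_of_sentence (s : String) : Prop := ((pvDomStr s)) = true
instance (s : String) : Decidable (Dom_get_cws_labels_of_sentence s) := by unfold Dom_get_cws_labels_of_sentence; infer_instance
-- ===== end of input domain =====

-- B replaces A's per-character index loop (branching on i==0 / i==len-1) by a closed-form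
-- per-word label block built with list multiplication, inside one flat comprehension (simpler).

-- ===== PORT A =====
def get_cws_labels_of_sentence (s : String) : List String :=
  (PySem.Str.split₀ s).foldl (fun label word =>
    if PySem.Str.len word = 1 then label ++ ["s"]
    else if PySem.Str.len word > 1 then
      (PySem.List.pyRange 0 (PySem.Str.len word) 1).foldl (fun label i =>
        if i = 0 then label ++ ["b"]
        else if i = PySem.Str.len word - 1 then label ++ ["e"]
        else label ++ ["m"]) label
    else label) []

-- ===== PORT B =====
def get_cws_labels_of_sentence_alt (s : String) : List String :=
  (PySem.Str.split₀ s).flatMap (fun word =>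
    if PySem.Str.len word = 1 then ["s"]
    else ["b"] ++ List.replicate (PySem.Str.len word - 2).toNat "m" ++ ["e"])

-- ===== PRECONDITION & SPEC =====
def Spec_get_cws_labels_of_sentence (s : String) (out : List String) : Prop := out = get_cws_labels_of_sentence_alt s
instance (s : String) (out : List String) : Decidable (Spec_get_cws_labels_of_sentence s out) := by unfold Spec_get_cws_labels_of_sentence; infer_instance

-- ===== CLAIM (what is proved, stated in full; the proofs are below) =====
def Claim_equal_get_cws_labels_of_sentence : Prop := ∀ (s : String), Dom_get_cws_labels_of_sentence s → Spec_get_cws_labels_of_sentence s (get_cws_labels_of_sentence s)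

-- ===== LEMMAS AND PROOFS =====

-- every word produced by str.split() is a nonempty list of characters
theorem pv_split0_go_ne_nil (s cur : List Char) (acc : List (List Char))
    (hacc : ∀ w ∈ acc, w ≠ []) :
    ∀ w ∈ PySem.Chars.split₀.go s cur acc, w ≠ [] := by
  induction s generalizing cur acc with
  | nil =>
    intro w hw
    unfold PySem.Chars.split₀.go at hw
    split_ifs at hw with h
    · exact hacc w (List.mem_reverse.mp hw)
    · rcases List.mem_cons.mp (List.mem_reverse.mp hw) with h' | h'
      · subst h'
        simp only [ne_eq, List.reverse_eq_nil_iff]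
        intro hc
        exact h (by simp [hc])
      · exact hacc w h'
  | cons c rest ih =>
    intro w hw
    unfold PySem.Chars.split₀.go at hw
    split_ifs at hw with h1 h2
    · exact ih [] acc hacc w hw
    · refine ih [] (cur.reverse :: acc) ?_ w hw
      intro x hx
      rcases List.mem_cons.mp hx with h' | h'
      · subst h'
        simp only [ne_eq, List.reverse_eq_nil_iff]
        intro hc
        exact h2 (by simp [hc])
      · exact hacc x h'
    · exact ih (c :: cur) acc hacc w hw

theorem pv_split0_words_ne_nil (s : String) :
    ∀ w ∈ PySem.Str.split₀ s, w.toList ≠ [] := by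
  intro w hw
  simp only [PySem.Str.split₀, List.mem_map] at hw
  obtain ⟨l, hl, rfl⟩ := hw
  have := pv_split0_go_ne_nil s.toList [] [] (by simp) l hl
  simpa using this

-- the inner per-character loop of A, in closed form, for a word of length n ≥ 2
theorem pv_inner_loop (n : Nat) (hn : 2 ≤ n) (label : List String) :
    (PySem.List.pyRange 0 (n : Int) 1).foldl (fun label i =>
        if i = 0 then label ++ ["b"]
        else if i = (n : Int) - 1 then label ++ ["e"]
        else label ++ ["m"]) label
      = label ++ ["b"] ++ List.replicate (n - 2) "m" ++ ["e"] := by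
  have hlast : PySem.List.pyRange ((n : Int) - 1) (n : Int) 1 = [(n : Int) - 1] := by
    have := PySem.List.pyRange_one_singleton ((n : Int) - 1)
    rw [← this]; congr 1; omega
  rw [PySem.List.pyRange_one_append 0 1 (n : Int) (by omega) (by omega),
      PySem.List.pyRange_one_append 1 ((n : Int) - 1) (n : Int) (by omega) (by omega),
      (show PySem.List.pyRange 0 1 1 = [(0 : Int)] by simpa using PySem.List.pyRange_one_singleton 0), hlast,
      List.foldl_append, List.foldl_append, List.foldl_cons, List.foldl_nil,
      List.foldl_cons, List.foldl_nil,
      if_pos rfl, if_neg (show ¬((n : Int) - 1 = 0) by omega), if_pos rfl,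
      PySem.List.foldl_congr_mem (PySem.List.pyRange 1 ((n : Int) - 1) 1) _
        (fun (acc : List String) (_ : Int) => acc ++ ["m"]) _
        (by
          intro acc x hx
          rw [PySem.List.mem_pyRange_one] at hx
          rw [if_neg (by omega), if_neg (by omega)]),
      PySem.List.foldl_append_singleton_eq_map (fun (_ : Int) => "m"),
      List.map_const', PySem.List.length_pyRange_one,
      (show ((n : Int) - 1 - 1).toNat = n - 2 by omega)]

-- one iteration of A's outer loop equals appending B's per-word block
theorem pv_step (label : List String) (word : String) (hw : word.toList ≠ []) :
    (if PySem.Str.len word = 1 then label ++ ["s"]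
     else if PySem.Str.len word > 1 then
       (PySem.List.pyRange 0 (PySem.Str.len word) 1).foldl (fun label i =>
         if i = 0 then label ++ ["b"]
         else if i = PySem.Str.len word - 1 then label ++ ["e"]
         else label ++ ["m"]) label
     else label)
    = label ++ (if PySem.Str.len word = 1 then ["s"]
        else ["b"] ++ List.replicate (PySem.Str.len word - 2).toNat "m" ++ ["e"]) := by
  have hn : 1 ≤ word.toList.length := List.length_pos_iff.mpr hw
  rw [PySem.Str.len_eq]
  by_cases h1 : word.toList.length = 1
  · simp [h1]
  · have h2 : 2 ≤ word.toList.length := by omega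
    rw [if_neg (show ¬((word.toList.length : Int) = 1) by omega),
        if_pos (show (word.toList.length : Int) > 1 by omega),
        if_neg (show ¬((word.toList.length : Int) = 1) by omega),
        pv_inner_loop _ h2,
        (show ((word.toList.length : Int) - 2).toNat = word.toList.length - 2 by omega)]
    simp

-- ===== VERDICT (by name: the statement is the Claim_ definition above) =====
theorem get_cws_labels_of_sentence_spec : Claim_equal_get_cws_labels_of_sentence := by
  intro s _
  unfold Spec_get_cws_labels_of_sentence get_cws_labels_of_sentence get_cws_labels_of_sentence_alt
  rw [PySem.List.foldl_congr_mem' (PySem.Str.split₀ s) _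
        (fun (label : List String) (word : String) =>
          label ++ (if PySem.Str.len word = 1 then ["s"]
            else ["b"] ++ List.replicate (PySem.Str.len word - 2).toNat "m" ++ ["e"])) []
        (by
          intro w hw label
          exact pv_step label w (pv_split0_words_ne_nil s w hw)),
      PySem.List.foldl_append_eq_flatMap]
  simp
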